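-- pv_equiv track=rewrite | github.com/doocs/leetcode | solution/3300-3399/3310.Remove Methods From Project/Solution.py | remainingMethods
-- ===== SOURCE A (Python) =====
-- from typing import List
--
-- def remainingMethods(
--     n: int, k: int, invocations: List[List[int]]
-- ) -> List[int]:
--     def dfs(i: int):
--         suspicious[i] = True
--         for j in g[i]:
--             if not suspicious[j]:
--                 dfs(j)
--
--     def dfs2(i: int):
--         vis[i] = True
--         for j in f[i]:
--             if not vis[j]:
--                 suspicious[j] = False
--                 dfs2(j)
--
--     f = [[] for _ in range(n)]
--     g = [[] for _ in range(n)]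
--     for a, b in invocations:
--         f[a].append(b)
--         f[b].append(a)
--         g[a].append(b)
--     suspicious = [False] * n
--     dfs(k)
--
--     vis = [False] * n
--     ans = []
--     for i in range(n):
--         if not suspicious[i] and not vis[i]:
--             dfs2(i)
--     return [i for i in range(n) if not suspicious[i]]
-- ===== SOURCE B (Python) =====
-- def remainingMethods(n, k, invocations):
--     g = [[] for _ in range(n)]
--     for a, b in invocations:
--         g[a].append(b)
--     suspicious = [False] * n
--     stack = [k]
--     while stack:
--         i = stack.pop()
--         if not suspicious[i]:
--             suspicious[i] = True
--             for j in g[i]: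
--                 if not suspicious[j]:
--                     stack.append(j)
--     if any(suspicious[a] != suspicious[b] for a, b in invocations):
--         return list(range(n))
--     return [i for i in range(n) if not suspicious[i]]
-- ===== Notes on version B (the rewrite author's own statement) =====
-- stated objective: simpler
-- what changed: Replaces A's recursive DFS plus a second undirected flood-fill (adjacency f, vis array, dfs2) by one iterative stack traversal for the suspicious set and a single linear scan over invocations: if any edge crosses the suspicious boundary the whole suspicious set lies in a mixed component and all n methods remain, otherwise the non-suspicious ones remain.
import Mathlib
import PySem

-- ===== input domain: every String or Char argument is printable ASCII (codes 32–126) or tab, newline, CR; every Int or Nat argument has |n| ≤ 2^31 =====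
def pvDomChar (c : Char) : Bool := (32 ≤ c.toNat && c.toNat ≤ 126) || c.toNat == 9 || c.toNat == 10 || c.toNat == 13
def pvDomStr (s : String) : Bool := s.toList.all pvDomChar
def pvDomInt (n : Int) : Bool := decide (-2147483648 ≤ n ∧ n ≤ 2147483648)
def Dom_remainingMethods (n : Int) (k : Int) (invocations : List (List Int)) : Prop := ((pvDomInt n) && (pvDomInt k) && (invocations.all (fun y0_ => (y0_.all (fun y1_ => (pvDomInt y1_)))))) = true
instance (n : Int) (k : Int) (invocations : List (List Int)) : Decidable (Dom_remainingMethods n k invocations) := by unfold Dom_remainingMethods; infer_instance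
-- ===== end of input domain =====

-- B replaces A's second (undirected flood-fill) DFS by a linear crossing-edge scan and the
-- recursive reachability DFS by an iterative stack loop; equivalence is about the return value.

-- ===== PORT A =====
-- builds the undirected adjacency f and directed adjacency g ('for a, b in invocations: ...');
-- a non-2-element row raises ValueError in Python (excluded by Pre_), the fallback keeps fg.
def pvBuildFG (fg : List (List Int) × List (List Int)) (inv : List Int) :
    List (List Int) × List (List Int) :=
  match inv with
  | [a, b] =>
      let f1 := PySem.List.pySetD fg.1 a (PySem.List.pyGetD fg.1 a [] ++ [b])
      let f2 := PySem.List.pySetD f1 b (PySem.List.pyGetD f1 b [] ++ [a])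
      let g1 := PySem.List.pySetD fg.2 a (PySem.List.pyGetD fg.2 a [] ++ [b])
      (f2, g1)
  | _ => fg

-- Python's recursive dfs, fueled (fuel n suffices: every nested call marks a fresh node)
mutual
def pvDfsA (g : List (List Int)) : Nat → Int → List Bool → List Bool
  | 0, _, susp => susp
  | fuel+1, i, susp =>
      pvDfsAList g fuel (PySem.List.pyGetD g i []) (PySem.List.pySetD susp i true)
  termination_by fuel _ _ => (fuel, 0)
def pvDfsAList (g : List (List Int)) : Nat → List Int → List Bool → List Bool
  | _, [], susp => susp
  | fuel, j :: js, susp =>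
      pvDfsAList g fuel js (if PySem.List.pyGetD susp j false then susp else pvDfsA g fuel j susp)
  termination_by fuel js _ => (fuel, js.length + 1)
end

-- Python's recursive dfs2 on state (vis, suspicious), fueled likewise
mutual
def pvDfs2A (f : List (List Int)) : Nat → Int → List Bool × List Bool → List Bool × List Bool
  | 0, _, vs => vs
  | fuel+1, i, vs =>
      pvDfs2AList f fuel (PySem.List.pyGetD f i []) (PySem.List.pySetD vs.1 i true, vs.2)
  termination_by fuel _ _ => (fuel, 0)
def pvDfs2AList (f : List (List Int)) : Nat → List Int → List Bool × List Bool → List Bool × List Bool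
  | _, [], vs => vs
  | fuel, j :: js, vs =>
      pvDfs2AList f fuel js
        (if PySem.List.pyGetD vs.1 j false then vs
         else pvDfs2A f fuel j (vs.1, PySem.List.pySetD vs.2 j false))
  termination_by fuel js _ => (fuel, js.length + 1)
end

def remainingMethods (n : Int) (k : Int) (invocations : List (List Int)) : List Int :=
  let f0 : List (List Int) := (PySem.List.pyRange 0 n 1).map (fun _ => [])
  let g0 : List (List Int) := (PySem.List.pyRange 0 n 1).map (fun _ => [])
  let fg := invocations.foldl pvBuildFG (f0, g0)
  let suspicious := pvDfsA fg.2 n.toNat k (PySem.List.pyRepeat [false] n)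
  let vis0 : List Bool := PySem.List.pyRepeat [false] n
  let st := (PySem.List.pyRange 0 n 1).foldl
      (fun vs i =>
        if !(PySem.List.pyGetD vs.2 i false) && !(PySem.List.pyGetD vs.1 i false)
        then pvDfs2A fg.1 n.toNat i vs else vs)
      (vis0, suspicious)
  (PySem.List.pyRange 0 n 1).filter (fun i => !(PySem.List.pyGetD st.2 i false))

-- ===== PORT B =====
def pvBuildG (g : List (List Int)) (inv : List Int) : List (List Int) :=
  match inv with
  | [a, b] => PySem.List.pySetD g a (PySem.List.pyGetD g a [] ++ [b])
  | _ => g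

-- the 'while stack' loop; fuel m+1 suffices: each iteration pops one element, and at most
-- one push per invocation edge ever happens
def pvBfs (g : List (List Int)) : Nat → List Int → List Bool → List Bool
  | 0, _, susp => susp
  | _+1, [], susp => susp
  | fuel+1, i :: stack, susp =>
      if PySem.List.pyGetD susp i false then pvBfs g fuel stack susp
      else
        let susp' := PySem.List.pySetD susp i true
        pvBfs g fuel
          ((PySem.List.pyGetD g i []).foldl
            (fun st j => if PySem.List.pyGetD susp' j false then st else j :: st) stack)
          susp'

def remainingMethods_alt (n : Int) (k : Int) (invocations : List (List Int)) : List Int :=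
  let g := invocations.foldl pvBuildG ((PySem.List.pyRange 0 n 1).map (fun _ => []))
  let suspicious := pvBfs g (invocations.length + 1) [k] (PySem.List.pyRepeat [false] n)
  if invocations.any (fun inv =>
      match inv with
      | [a, b] => PySem.List.pyGetD suspicious a false != PySem.List.pyGetD suspicious b false
      | _ => false)
  then PySem.List.pyRange 0 n 1
  else (PySem.List.pyRange 0 n 1).filter (fun i => !(PySem.List.pyGetD suspicious i false))

-- ===== PRECONDITION & SPEC =====
-- Pre_ = exactly the inputs where Python A returns: method count ≥ 1, k a valid (possibly
-- negative) index, every invocation a 2-element row of valid indices (otherwise IndexError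
-- or ValueError is raised).
def Pre_remainingMethods (n : Int) (k : Int) (invocations : List (List Int)) : Prop :=
  1 ≤ n ∧ PySem.Raise.InRange n.toNat k ∧
    ∀ l ∈ invocations, l.length = 2 ∧ ∀ x ∈ l, PySem.Raise.InRange n.toNat x
instance (n : Int) (k : Int) (invocations : List (List Int)) :
    Decidable (Pre_remainingMethods n k invocations) := by
  unfold Pre_remainingMethods; infer_instance

def pvWitness_remainingMethods : Int × Int × List (List Int) := (3, 0, [[0, 1], [2, 1]])

def Spec_remainingMethods (n : Int) (k : Int) (invocations : List (List Int)) (out : List Int) : Prop := out = remainingMethods_alt n k invocations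
instance (n : Int) (k : Int) (invocations : List (List Int)) (out : List Int) : Decidable (Spec_remainingMethods n k invocations out) := by unfold Spec_remainingMethods; infer_instance

-- ===== CLAIM (what is proved, stated in full; the proofs are below) =====
def Claim_equal_remainingMethods : Prop := ∀ (n : Int) (k : Int) (invocations : List (List Int)), Dom_remainingMethods n k invocations → Pre_remainingMethods n k invocations → Spec_remainingMethods n k invocations (remainingMethods n k invocations)

-- ===== LEMMAS AND PROOFS =====


-- ---------- basic index / list facts ----------

-- Python's negative-index normalisation on a length-n' list
def pvI (n' : Nat) (i : Int) : Nat := if 0 ≤ i then i.toNat else n' - (-i).toNat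

theorem pvI_lt {n' : Nat} {i : Int} (h : PySem.Raise.InRange n' i) : pvI n' i < n' := by
  rcases h with ⟨h1, h2⟩; unfold pvI; split <;> omega

theorem pvIdx_eq {n' : Nat} {i : Int} (h : PySem.Raise.InRange n' i) :
    PySem.List.pyIdx? n' i = some (pvI n' i) := by
  rcases h with ⟨h1, h2⟩
  unfold PySem.List.pyIdx? pvI
  split_ifs <;> simp

theorem pvGetD {α : Type} (s : List α) (i : Int) (d : α)
    (h : PySem.Raise.InRange s.length i) :
    PySem.List.pyGetD s i d = s.getD (pvI s.length i) d := by
  unfold PySem.List.pyGetD PySem.List.pyGet?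
  rw [pvIdx_eq h]
  simp [List.getD]

theorem pvSetD {α : Type} (s : List α) (i : Int) (v : α)
    (h : PySem.Raise.InRange s.length i) :
    PySem.List.pySetD s i v = s.set (pvI s.length i) v := by
  unfold PySem.List.pySetD PySem.List.pySet?
  rw [pvIdx_eq h]
  rfl

theorem pv_getD_set {α : Type} (s : List α) (p : Nat) (v d : α) (a : Nat) :
    p < s.length → ((s.set p v).getD a d = if a = p then v else s.getD a d) := by
  intro hp
  by_cases h : a = p
  · subst h; simp [List.getD, hp]
  · simp [List.getD, List.getElem?_set_ne (fun e => h e.symm), h]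

theorem pv_set_false_id (s : List Bool) (p : Nat) (h : s.getD p false = false) :
    s.set p false = s := by
  apply List.ext_getElem?
  intro a
  by_cases hp : p < s.length
  · by_cases hap : a = p
    · subst hap
      simp [List.getD] at h
      rw [List.getElem?_set]
      cases hx : s[a]? with
      | none => simp at hx; omega
      | some b => rw [hx] at h; simp at h; simp [hp, h]
    · simp [List.getElem?_set_ne (fun e => hap e.symm)]
  · rw [List.set_eq_of_length_le (by omega)]

def pvCnt (s : List Bool) : Nat := s.countP (fun b => !b)

theorem pvCnt_le (s : List Bool) : pvCnt s ≤ s.length := List.countP_le_length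

theorem pvCnt_set_true (s : List Bool) (p : Nat)
    (hp : p < s.length) (h : s.getD p false = false) :
    pvCnt (s.set p true) < pvCnt s := by
  induction s generalizing p with
  | nil => simp at hp
  | cons x xs ih =>
    cases p with
    | zero =>
      simp [List.getD] at h
      subst h
      simp [pvCnt]
    | succ q =>
      have := ih q (by simpa using hp) (by simpa [List.getD] using h)
      simp [pvCnt, List.countP_cons] at *
      omega

theorem pv_getD_default (s : List Bool) (a : Nat) (h : s.length ≤ a) :
    s.getD a false = false := by
  simp [List.getD, List.getElem?_eq_none h]

theorem pv_replicate_getD (n' a : Nat) : (List.replicate n' false).getD a false = false := by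
  by_cases h : a < n'
  · simp [List.getD, h]
  · exact pv_getD_default _ _ (by simpa using h)

theorem pvCnt_replicate (n' : Nat) : pvCnt (List.replicate n' false) = n' := by
  induction n' with
  | zero => rfl
  | succ m ih => simp [pvCnt, List.replicate_succ] at *; omega

theorem pv_repeat_false (n : Int) :
    PySem.List.pyRepeat [false] n = List.replicate n.toNat false :=
  PySem.List.pyRepeat_singleton false n

theorem pv_map_const_getD {α β : Type} (l : List α) (c : β) (a : Nat) :
    ((l.map fun _ => c).getD a c) = c := by
  by_cases h : a < l.length
  · simp [List.getD]
  · exact List.getD_eq_default _ _ (by simpa using h)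

theorem pv_list_eq_of_getD (s t : List Bool) (hl : s.length = t.length)
    (h : ∀ a, s.getD a false = t.getD a false) : s = t := by
  apply List.ext_getElem hl
  intro a h1 h2
  have := h a
  simp [List.getD, h1, h2] at this
  exact this


-- ---------- the edge relation and adjacency construction ----------

-- directed edge on normalised node numbers, read off the input
def pvE (invs : List (List Int)) (n' : Nat) (a b : Nat) : Prop :=
  ∃ x y, [x, y] ∈ invs ∧ pvI n' x = a ∧ pvI n' y = b

theorem pv_addEdge_len (n' : Nat) (s : List (List Int)) (hl : s.length = n')
    (x : Int) (hx : PySem.Raise.InRange n' x) (y : Int) :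
    (PySem.List.pySetD s x (PySem.List.pyGetD s x [] ++ [y])).length = n' := by
  rw [pvSetD _ _ _ (hl ▸ hx)]
  simp [hl]

theorem pv_mem_addEdge (n' : Nat) (s : List (List Int)) (hl : s.length = n')
    (x : Int) (hx : PySem.Raise.InRange n' x) (y : Int) (a : Nat) (j : Int) :
    (j ∈ (PySem.List.pySetD s x (PySem.List.pyGetD s x [] ++ [y])).getD a [] ↔
      (j ∈ s.getD a [] ∨ (a = pvI n' x ∧ j = y))) := by
  rw [pvSetD _ _ _ (hl ▸ hx), pvGetD _ _ _ (hl ▸ hx)]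
  have hplt : pvI s.length x < s.length := pvI_lt (hl ▸ hx)
  rw [pv_getD_set _ _ _ _ _ hplt]
  rw [hl]
  by_cases hax : a = pvI n' x
  · simp [hax]
  · simp [hax]

theorem pvBuildG_spec (n' : Nat) :
    ∀ (l : List (List Int)) (acc : List (List Int)),
      (∀ inv ∈ l, inv.length = 2 ∧ ∀ x ∈ inv, PySem.Raise.InRange n' x) →
      acc.length = n' →
      (l.foldl pvBuildG acc).length = n' ∧
      ∀ a j, (j ∈ (l.foldl pvBuildG acc).getD a [] ↔
        (j ∈ acc.getD a [] ∨ ∃ x y, [x, y] ∈ l ∧ pvI n' x = a ∧ y = j)) := by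
  intro l
  induction l with
  | nil => intro acc _ hl; exact ⟨hl, by simp⟩
  | cons inv t ih =>
    intro acc hwf hl
    obtain ⟨hlen2, hr⟩ := hwf inv (by simp)
    rcases inv with _ | ⟨x, _ | ⟨y, _ | _⟩⟩ <;> simp at hlen2
    have hx : PySem.Raise.InRange n' x := hr x (by simp)
    have step : List.foldl pvBuildG acc ([x, y] :: t) =
        List.foldl pvBuildG (PySem.List.pySetD acc x (PySem.List.pyGetD acc x [] ++ [y])) t := rfl
    rw [step]
    obtain ⟨ihl, ihm⟩ := ih (PySem.List.pySetD acc x (PySem.List.pyGetD acc x [] ++ [y]))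
      (fun i hi => hwf i (by simp [hi])) (pv_addEdge_len n' acc hl x hx y)
    refine ⟨ihl, fun a j => ?_⟩
    rw [ihm a j, pv_mem_addEdge n' acc hl x hx y a j]
    constructor
    · rintro ((h | ⟨h1, h2⟩) | ⟨x', y', hm, h1, h2⟩)
      · exact Or.inl h
      · exact Or.inr ⟨x, y, by simp, h1.symm, h2.symm⟩
      · exact Or.inr ⟨x', y', by simp [hm], h1, h2⟩
    · rintro (h | ⟨x', y', hm, h1, h2⟩)
      · exact Or.inl (Or.inl h)
      · rcases List.mem_cons.mp hm with heq | hmt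
        · obtain ⟨e1, e2⟩ : x' = x ∧ y' = y := by simpa using heq
          subst e1; subst e2
          exact Or.inl (Or.inr ⟨h1.symm, h2.symm⟩)
        · exact Or.inr ⟨x', y', hmt, h1, h2⟩


theorem pvFG_snd : ∀ (l : List (List Int)) (fg : List (List Int) × List (List Int)),
    (l.foldl pvBuildFG fg).2 = l.foldl pvBuildG fg.2 := by
  intro l
  induction l with
  | nil => intro fg; rfl
  | cons inv t ih =>
    intro fg
    have h : (pvBuildFG fg inv).2 = pvBuildG fg.2 inv := by
      rcases inv with _ | ⟨x, _ | ⟨y, _ | _⟩⟩ <;> rfl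
    calc (List.foldl pvBuildFG fg (inv :: t)).2 = (t.foldl pvBuildFG (pvBuildFG fg inv)).2 := rfl
      _ = t.foldl pvBuildG (pvBuildFG fg inv).2 := ih _
      _ = t.foldl pvBuildG (pvBuildG fg.2 inv) := by rw [h]

theorem pvBuildFG_fst_spec (n' : Nat) :
    ∀ (l : List (List Int)) (acc : List (List Int) × List (List Int)),
      (∀ inv ∈ l, inv.length = 2 ∧ ∀ x ∈ inv, PySem.Raise.InRange n' x) →
      acc.1.length = n' →
      (l.foldl pvBuildFG acc).1.length = n' ∧
      ∀ a j, (j ∈ (l.foldl pvBuildFG acc).1.getD a [] ↔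
        (j ∈ acc.1.getD a [] ∨ ∃ x y, [x, y] ∈ l ∧
          ((pvI n' x = a ∧ y = j) ∨ (pvI n' y = a ∧ x = j)))) := by
  intro l
  induction l with
  | nil => intro acc _ hl; exact ⟨hl, by simp⟩
  | cons inv t ih =>
    intro acc hwf hl
    obtain ⟨hlen2, hr⟩ := hwf inv (by simp)
    rcases inv with _ | ⟨x, _ | ⟨y, _ | _⟩⟩ <;> simp at hlen2
    have hx : PySem.Raise.InRange n' x := hr x (by simp)
    have hy : PySem.Raise.InRange n' y := hr y (by simp)
    have hf1l := pv_addEdge_len n' acc.1 hl x hx y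
    have hfst : (pvBuildFG acc [x, y]).1 =
        PySem.List.pySetD (PySem.List.pySetD acc.1 x (PySem.List.pyGetD acc.1 x [] ++ [y])) y
          (PySem.List.pyGetD (PySem.List.pySetD acc.1 x (PySem.List.pyGetD acc.1 x [] ++ [y])) y [] ++ [x]) := rfl
    have step : List.foldl pvBuildFG acc ([x, y] :: t) = List.foldl pvBuildFG (pvBuildFG acc [x, y]) t := rfl
    rw [step]
    obtain ⟨ihl, ihm⟩ := ih (pvBuildFG acc [x, y]) (fun i hi => hwf i (by simp [hi]))
      (by rw [hfst]; exact pv_addEdge_len n' _ hf1l y hy x)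
    refine ⟨ihl, fun a j => ?_⟩
    rw [ihm a j]
    rw [show ((pvBuildFG acc [x, y]).1.getD a []) = _ from congrArg (fun z => z.getD a ([]:List Int)) hfst]
    rw [pv_mem_addEdge n' _ hf1l y hy x a j, pv_mem_addEdge n' acc.1 hl x hx y a j]
    constructor
    · rintro (((h | ⟨h1, h2⟩) | ⟨h1, h2⟩) | ⟨x', y', hm, h12⟩)
      · exact Or.inl h
      · exact Or.inr ⟨x, y, by simp, Or.inl ⟨h1.symm, h2.symm⟩⟩
      · exact Or.inr ⟨x, y, by simp, Or.inr ⟨h1.symm, h2.symm⟩⟩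
      · exact Or.inr ⟨x', y', by simp [hm], h12⟩
    · rintro (h | ⟨x', y', hm, h12⟩)
      · exact Or.inl (Or.inl (Or.inl h))
      · rcases List.mem_cons.mp hm with heq | hmt
        · obtain ⟨e1, e2⟩ : x' = x ∧ y' = y := by simpa using heq
          subst e1; subst e2
          rcases h12 with ⟨h1, h2⟩ | ⟨h1, h2⟩
          · exact Or.inl (Or.inl (Or.inr ⟨h1.symm, h2.symm⟩))
          · exact Or.inl (Or.inr ⟨h1.symm, h2.symm⟩)
        · exact Or.inr ⟨x', y', hmt, h12⟩


-- ---------- more small facts ----------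

theorem pvIdx_some_lt {n' : Nat} {i : Int} {p : Nat} (h : PySem.List.pyIdx? n' i = some p) :
    p < n' := by
  unfold PySem.List.pyIdx? at h
  split_ifs at h <;> simp at h <;> omega

theorem pv_getD_pySetD_true (s : List Bool) (i : Int) (a : Nat)
    (h : s.getD a false = true) : (PySem.List.pySetD s i true).getD a false = true := by
  unfold PySem.List.pySetD PySem.List.pySet?
  cases hx : PySem.List.pyIdx? s.length i with
  | none => simpa using h
  | some p =>
    simp only [Option.map_some, Option.getD_some]
    rw [pv_getD_set _ _ _ _ _ (pvIdx_some_lt hx)]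
    split
    · rfl
    · exact h

theorem pvCnt_set_le (s : List Bool) (p : Nat) : pvCnt (s.set p true) ≤ pvCnt s := by
  induction s generalizing p with
  | nil => simp [pvCnt]
  | cons x xs ih =>
    cases p with
    | zero => cases x <;> simp [pvCnt]
    | succ q => have := ih q; simp [pvCnt, List.countP_cons] at *; omega

theorem pvCnt_pySetD_le (s : List Bool) (i : Int) :
    pvCnt (PySem.List.pySetD s i true) ≤ pvCnt s := by
  unfold PySem.List.pySetD PySem.List.pySet?
  cases hx : PySem.List.pyIdx? s.length i with
  | none => simp
  | some p => simpa using pvCnt_set_le s p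

theorem pvCnt_pos (s : List Bool) (p : Nat) (hp : p < s.length)
    (h : s.getD p false = false) : 0 < pvCnt s := by
  have hm : s[p] ∈ s := List.getElem_mem hp
  have he : s[p] = false := by simpa [List.getD, List.getElem?_eq_getElem hp] using h
  have : 0 < s.countP (fun b => !b) := List.countP_pos_iff.mpr ⟨s[p], hm, by simp [he]⟩
  simpa [pvCnt] using this

theorem pv_getD_set_self (s : List Bool) (p : Nat) (v : Bool) (hp : p < s.length) :
    (s.set p v).getD p false = v := by
  rw [pv_getD_set _ _ _ _ _ hp]; simp

-- ---------- phase 1 of A: the recursive dfs computes directed reachability ----------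

theorem pvDfsA_len (g : List (List Int)) :
    (∀ fuel i s, (pvDfsA g fuel i s).length = s.length) ∧
    (∀ fuel js s, (pvDfsAList g fuel js s).length = s.length) := by
  refine pvDfsA.mutual_induct g
    (fun fuel i s => (pvDfsA g fuel i s).length = s.length)
    (fun fuel js s => (pvDfsAList g fuel js s).length = s.length) ?_ ?_ ?_ ?_
  · intro i s; simp [pvDfsA]
  · intro fuel i s ih2
    rw [pvDfsA, ih2, PySem.List.length_pySetD]
  · intro fuel s; simp [pvDfsAList]
  · intro fuel j js s ih1 ih2
    rw [pvDfsAList]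
    by_cases hc : PySem.List.pyGetD s j false = true
    · rw [if_pos hc]; rw [dif_pos hc] at ih2; exact ih2
    · have hc' := eq_false_of_ne_true hc
      rw [hc'] at ih2 ⊢
      rw [if_neg Bool.false_ne_true]
      rw [dif_neg Bool.false_ne_true] at ih2
      rw [ih2, ih1]

theorem pvDfsA_mono (g : List (List Int)) :
    (∀ fuel i s a, s.getD a false = true → (pvDfsA g fuel i s).getD a false = true) ∧
    (∀ fuel js s a, s.getD a false = true → (pvDfsAList g fuel js s).getD a false = true) := by
  refine pvDfsA.mutual_induct g
    (fun fuel i s => ∀ a, s.getD a false = true → (pvDfsA g fuel i s).getD a false = true)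
    (fun fuel js s => ∀ a, s.getD a false = true → (pvDfsAList g fuel js s).getD a false = true)
    ?_ ?_ ?_ ?_
  · intro i s a h; simpa [pvDfsA] using h
  · intro fuel i s ih2 a h
    rw [pvDfsA]
    exact ih2 a (pv_getD_pySetD_true s i a h)
  · intro fuel s a h; simpa [pvDfsAList] using h
  · intro fuel j js s ih1 ih2 a h
    rw [pvDfsAList]
    by_cases hc : PySem.List.pyGetD s j false = true
    · rw [if_pos hc]; rw [dif_pos hc] at ih2; exact ih2 a h
    · have hc' := eq_false_of_ne_true hc
      rw [hc'] at ih2 ⊢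
      rw [if_neg Bool.false_ne_true]
      rw [dif_neg Bool.false_ne_true] at ih2
      exact ih2 a (ih1 a h)

theorem pvDfsA_cnt (g : List (List Int)) :
    (∀ fuel i s, pvCnt (pvDfsA g fuel i s) ≤ pvCnt s) ∧
    (∀ fuel js s, pvCnt (pvDfsAList g fuel js s) ≤ pvCnt s) := by
  refine pvDfsA.mutual_induct g
    (fun fuel i s => pvCnt (pvDfsA g fuel i s) ≤ pvCnt s)
    (fun fuel js s => pvCnt (pvDfsAList g fuel js s) ≤ pvCnt s) ?_ ?_ ?_ ?_
  · intro i s; simp [pvDfsA]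
  · intro fuel i s ih2
    rw [pvDfsA]
    exact le_trans ih2 (pvCnt_pySetD_le s i)
  · intro fuel s; simp [pvDfsAList]
  · intro fuel j js s ih1 ih2
    rw [pvDfsAList]
    by_cases hc : PySem.List.pyGetD s j false = true
    · rw [if_pos hc]; rw [dif_pos hc] at ih2; exact ih2
    · have hc' := eq_false_of_ne_true hc
      rw [hc'] at ih2 ⊢
      rw [if_neg Bool.false_ne_true]
      rw [dif_neg Bool.false_ne_true] at ih2
      exact le_trans ih2 ih1

theorem pvDfsA_sound (g : List (List Int)) (n' : Nat) (P : Nat → Prop)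
    (hg : g.length = n')
    (hnb : ∀ a j, j ∈ g.getD a [] → PySem.Raise.InRange n' j ∧ (P a → P (pvI n' j))) :
    (∀ fuel i s, s.length = n' → PySem.Raise.InRange n' i → P (pvI n' i) →
      (∀ a, s.getD a false = true → P a) →
      ∀ a, (pvDfsA g fuel i s).getD a false = true → P a) ∧
    (∀ fuel js s, s.length = n' → (∀ j ∈ js, PySem.Raise.InRange n' j ∧ P (pvI n' j)) →
      (∀ a, s.getD a false = true → P a) →
      ∀ a, (pvDfsAList g fuel js s).getD a false = true → P a) := by
  refine pvDfsA.mutual_induct g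
    (fun fuel i s => s.length = n' → PySem.Raise.InRange n' i → P (pvI n' i) →
      (∀ a, s.getD a false = true → P a) →
      ∀ a, (pvDfsA g fuel i s).getD a false = true → P a)
    (fun fuel js s => s.length = n' → (∀ j ∈ js, PySem.Raise.InRange n' j ∧ P (pvI n' j)) →
      (∀ a, s.getD a false = true → P a) →
      ∀ a, (pvDfsAList g fuel js s).getD a false = true → P a) ?_ ?_ ?_ ?_
  · intro i s _ _ _ hm a h
    rw [pvDfsA] at h; exact hm a h
  · intro fuel i s ih2 hl hi hp hm a h
    rw [pvDfsA] at h
    have hset : PySem.List.pySetD s i true = s.set (pvI n' i) true := by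
      have := pvSetD s i true (hl ▸ hi); rwa [hl] at this
    refine ih2 ?_ ?_ ?_ a h
    · rw [hset]; simp [hl]
    · intro j hj
      have hj' : j ∈ g.getD (pvI n' i) [] := by
        have := pvGetD g i ([] : List Int) (hg ▸ hi); rw [hg] at this; rwa [this] at hj
      exact ⟨(hnb _ j hj').1, (hnb _ j hj').2 hp⟩
    · intro a' ha'
      rw [hset, pv_getD_set _ _ _ _ _ (by rw [hl]; exact pvI_lt hi)] at ha'
      by_cases hax : a' = pvI n' i
      · rw [hax]; exact hp
      · rw [if_neg hax] at ha'; exact hm a' ha'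
  · intro fuel s hl _ hm a h
    rw [pvDfsAList] at h; exact hm a h
  · intro fuel j js s ih1 ih2 hl hjs hm a h
    rw [pvDfsAList] at h
    by_cases hc : PySem.List.pyGetD s j false = true
    · rw [if_pos hc] at h; rw [dif_pos hc] at ih2
      exact ih2 hl (fun j' hj' => hjs j' (by simp [hj'])) hm a h
    · have hc' := eq_false_of_ne_true hc
      rw [hc'] at ih2 h
      rw [if_neg Bool.false_ne_true] at h
      rw [dif_neg Bool.false_ne_true] at ih2
      obtain ⟨hjr, hjp⟩ := hjs j (by simp)
      have hm2 := ih1 hl hjr hjp hm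
      exact ih2 ((pvDfsA_len g).1 fuel j s ▸ hl) (fun j' hj' => hjs j' (by simp [hj'])) hm2 a h

theorem pvDfsA_complete (g : List (List Int)) (n' : Nat)
    (hg : g.length = n')
    (hnb : ∀ a j, j ∈ g.getD a [] → PySem.Raise.InRange n' j) :
    (∀ fuel i s, s.length = n' → PySem.Raise.InRange n' i →
      s.getD (pvI n' i) false = false → pvCnt s ≤ fuel →
      (pvDfsA g fuel i s).getD (pvI n' i) false = true ∧
      (∀ a, (pvDfsA g fuel i s).getD a false = true →
        s.getD a false = true ∨
        ∀ j ∈ g.getD a [], (pvDfsA g fuel i s).getD (pvI n' j) false = true)) ∧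
    (∀ fuel js s, s.length = n' → (∀ j ∈ js, PySem.Raise.InRange n' j) → pvCnt s ≤ fuel →
      (∀ j ∈ js, (pvDfsAList g fuel js s).getD (pvI n' j) false = true) ∧
      (∀ a, (pvDfsAList g fuel js s).getD a false = true →
        s.getD a false = true ∨
        ∀ j ∈ g.getD a [], (pvDfsAList g fuel js s).getD (pvI n' j) false = true)) := by
  refine pvDfsA.mutual_induct g
    (fun fuel i s => s.length = n' → PySem.Raise.InRange n' i →
      s.getD (pvI n' i) false = false → pvCnt s ≤ fuel →
      (pvDfsA g fuel i s).getD (pvI n' i) false = true ∧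
      (∀ a, (pvDfsA g fuel i s).getD a false = true →
        s.getD a false = true ∨
        ∀ j ∈ g.getD a [], (pvDfsA g fuel i s).getD (pvI n' j) false = true))
    (fun fuel js s => s.length = n' → (∀ j ∈ js, PySem.Raise.InRange n' j) → pvCnt s ≤ fuel →
      (∀ j ∈ js, (pvDfsAList g fuel js s).getD (pvI n' j) false = true) ∧
      (∀ a, (pvDfsAList g fuel js s).getD a false = true →
        s.getD a false = true ∨
        ∀ j ∈ g.getD a [], (pvDfsAList g fuel js s).getD (pvI n' j) false = true)) ?_ ?_ ?_ ?_
  · intro i s hl hi hfalse hcnt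
    have := pvCnt_pos s (pvI n' i) (by rw [hl]; exact pvI_lt hi) hfalse
    omega
  · intro fuel i s ih2 hl hi hfalse hcnt
    rw [pvDfsA]
    have hset : PySem.List.pySetD s i true = s.set (pvI n' i) true := by
      have := pvSetD s i true (hl ▸ hi); rwa [hl] at this
    have hplt : pvI n' i < s.length := by rw [hl]; exact pvI_lt hi
    have hlen1 : (PySem.List.pySetD s i true).length = n' := by rw [hset]; simp [hl]
    have hcnt1 : pvCnt (PySem.List.pySetD s i true) ≤ fuel := by
      rw [hset]
      have := pvCnt_set_true s (pvI n' i) hplt hfalse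
      omega
    have hjsr : ∀ j ∈ PySem.List.pyGetD g i [], PySem.Raise.InRange n' j := by
      intro j hj
      have heq : PySem.List.pyGetD g i ([] : List Int) = g.getD (pvI n' i) [] := by
        have := pvGetD g i ([] : List Int) (hg ▸ hi); rwa [hg] at this
      exact hnb _ j (heq ▸ hj)
    obtain ⟨halljs, hclos⟩ := ih2 hlen1 hjsr hcnt1
    have heqjs : PySem.List.pyGetD g i ([] : List Int) = g.getD (pvI n' i) [] := by
      have := pvGetD g i ([] : List Int) (hg ▸ hi); rwa [hg] at this
    constructor
    · apply (pvDfsA_mono g).2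
      rw [hset]
      exact pv_getD_set_self s (pvI n' i) true hplt
    · intro a ha
      rcases hclos a ha with hold | hnbs
      · rw [hset, pv_getD_set _ _ _ _ _ hplt] at hold
        by_cases hax : a = pvI n' i
        · right
          rw [hax, ← heqjs]
          exact halljs
        · left; rwa [if_neg hax] at hold
      · right; exact hnbs
  · intro fuel s hl _ _
    refine ⟨by simp, fun a ha => Or.inl (by rw [pvDfsAList] at ha; exact ha)⟩
  · intro fuel j js s ih1 ih2 hl hjs hcnt
    rw [pvDfsAList]
    by_cases hc : PySem.List.pyGetD s j false = true
    · rw [if_pos hc]; rw [dif_pos hc] at ih2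
      obtain ⟨halljs, hclos⟩ := ih2 hl (fun j' hj' => hjs j' (by simp [hj'])) hcnt
      have hjr := hjs j (by simp)
      have hjt : s.getD (pvI n' j) false = true := by
        have := pvGetD s j false (hl ▸ hjr); rw [hl] at this; rwa [this] at hc
      refine ⟨?_, fun a ha => hclos a ha⟩
      intro j' hj'
      rcases List.mem_cons.mp hj' with he | hm
      · rw [he]; exact (pvDfsA_mono g).2 fuel js s (pvI n' j) hjt
      · exact halljs j' hm
    · have hc' := eq_false_of_ne_true hc
      rw [hc'] at ih2 ⊢
      rw [if_neg Bool.false_ne_true]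
      rw [dif_neg Bool.false_ne_true] at ih2
      have hjr := hjs j (by simp)
      have hjf : s.getD (pvI n' j) false = false := by
        have := pvGetD s j false (hl ▸ hjr); rw [hl] at this; rw [← this]; exact hc'
      obtain ⟨hmark, hclos1⟩ := ih1 hl hjr hjf hcnt
      have hl2 : (pvDfsA g fuel j s).length = n' := by rw [(pvDfsA_len g).1]; exact hl
      have hcnt2 : pvCnt (pvDfsA g fuel j s) ≤ fuel := le_trans ((pvDfsA_cnt g).1 fuel j s) hcnt
      obtain ⟨halljs, hclos2⟩ := ih2 hl2 (fun j' hj' => hjs j' (by simp [hj'])) hcnt2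
      refine ⟨?_, ?_⟩
      · intro j' hj'
        rcases List.mem_cons.mp hj' with he | hm
        · rw [he]; exact (pvDfsA_mono g).2 fuel js _ (pvI n' j) hmark
        · exact halljs j' hm
      · intro a ha
        rcases hclos2 a ha with h2 | hnbs
        · rcases hclos1 a h2 with h1 | hnbs1
          · exact Or.inl h1
          · right
            intro j' hj'
            exact (pvDfsA_mono g).2 fuel js _ (pvI n' j') (hnbs1 j' hj')
        · right; exact hnbs


-- ---------- phase 1 of B: the stack loop computes the same reachability ----------

def pvPot (g : List (List Int)) (n' : Nat) (s : List Bool) : Nat :=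
  ∑ a ∈ Finset.range n', if s.getD a false = false then (g.getD a []).length else 0

theorem pvPot_set (g : List (List Int)) (n' : Nat) (s : List Bool) (p : Nat)
    (hp : p < n') (hps : p < s.length) (hf : s.getD p false = false) :
    pvPot g n' (s.set p true) + (g.getD p []).length = pvPot g n' s := by
  unfold pvPot
  rw [← Finset.sum_erase_add _ _ (Finset.mem_range.mpr hp),
      ← Finset.sum_erase_add _ _ (Finset.mem_range.mpr hp)]
  have h1 : ∀ a ∈ (Finset.range n').erase p,
      (if (s.set p true).getD a false = false then (g.getD a []).length else 0) =
      (if s.getD a false = false then (g.getD a []).length else 0) := by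
    intro a ha
    rw [pv_getD_set _ _ _ _ _ hps, if_neg (Finset.ne_of_mem_erase ha)]
  rw [Finset.sum_congr rfl h1]
  rw [pv_getD_set_self s p true hps, hf]
  simp

theorem pv_push_subset (s' : List Bool) (lst : List Int) :
    ∀ stack, ∀ x ∈ stack, x ∈ lst.foldl
      (fun st j => if PySem.List.pyGetD s' j false then st else j :: st) stack := by
  induction lst with
  | nil => intro stack x hx; exact hx
  | cons j t ih =>
    intro stack x hx
    rw [List.foldl_cons]
    apply ih
    show x ∈ (if PySem.List.pyGetD s' j false = true then stack else j :: stack)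
    by_cases hc : PySem.List.pyGetD s' j false = true
    · rw [if_pos hc]; exact hx
    · rw [if_neg hc]; simp [hx]

theorem pv_push_new (s' : List Bool) (lst : List Int) :
    ∀ stack, ∀ j ∈ lst, PySem.List.pyGetD s' j false = false →
      j ∈ lst.foldl (fun st j => if PySem.List.pyGetD s' j false then st else j :: st) stack := by
  induction lst with
  | nil => simp
  | cons j0 t ih =>
    intro stack j hj hf
    rw [List.foldl_cons]
    rcases List.mem_cons.mp hj with he | hm
    · subst he
      have : (if PySem.List.pyGetD s' j false = true then stack else j :: stack) = j :: stack := by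
        rw [hf]; simp
      rw [this]
      exact pv_push_subset s' t _ j (by simp)
    · exact ih _ j hm hf

theorem pv_push_from (s' : List Bool) (lst : List Int) :
    ∀ stack, ∀ x ∈ lst.foldl
      (fun st j => if PySem.List.pyGetD s' j false then st else j :: st) stack,
      x ∈ stack ∨ x ∈ lst := by
  induction lst with
  | nil => intro stack x hx; exact Or.inl hx
  | cons j t ih =>
    intro stack x hx
    rcases ih _ x hx with hs | hl
    · have hs' : x ∈ (if PySem.List.pyGetD s' j false = true then stack else j :: stack) := hs
      by_cases hc : PySem.List.pyGetD s' j false = true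
      · rw [if_pos hc] at hs'; exact Or.inl hs'
      · rw [if_neg hc] at hs'
        rcases List.mem_cons.mp hs' with he | hm
        · exact Or.inr (by simp [he])
        · exact Or.inl hm
    · exact Or.inr (by simp [hl])

theorem pv_push_len (s' : List Bool) (lst : List Int) :
    ∀ stack, (lst.foldl
      (fun st j => if PySem.List.pyGetD s' j false then st else j :: st) stack).length ≤
      stack.length + lst.length := by
  induction lst with
  | nil => simp
  | cons j t ih =>
    intro stack
    rw [List.foldl_cons]
    refine le_trans (ih _) ?_
    have hb : (if PySem.List.pyGetD s' j false = true then stack else j :: stack).length ≤ stack.length + 1 := by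
      by_cases hc : PySem.List.pyGetD s' j false = true
      · rw [if_pos hc]; omega
      · rw [if_neg hc]; simp
    simp only [List.length_cons]
    omega

theorem pvBfs_main (g : List (List Int)) (n' : Nat) (P : Nat → Prop)
    (hg : g.length = n')
    (hnb : ∀ a j, j ∈ g.getD a [] → PySem.Raise.InRange n' j ∧ (P a → P (pvI n' j))) :
    ∀ fuel stack s, s.length = n' → (∀ x ∈ stack, PySem.Raise.InRange n' x) →
      stack.length + pvPot g n' s ≤ fuel →
      (∀ a, s.getD a false = true → (pvBfs g fuel stack s).getD a false = true) ∧
      (∀ x ∈ stack, (pvBfs g fuel stack s).getD (pvI n' x) false = true) ∧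
      ((∀ a, s.getD a false = true → P a) → (∀ x ∈ stack, P (pvI n' x)) →
        ∀ a, (pvBfs g fuel stack s).getD a false = true → P a) ∧
      ((∀ a, s.getD a false = true → ∀ j ∈ g.getD a [], s.getD (pvI n' j) false = true ∨ j ∈ stack) →
        ∀ a, (pvBfs g fuel stack s).getD a false = true →
          ∀ j ∈ g.getD a [], (pvBfs g fuel stack s).getD (pvI n' j) false = true) := by
  intro fuel
  induction fuel with
  | zero =>
    intro stack s hl hr hb
    have hstack : stack = [] := by
      cases stack with
      | nil => rfl
      | cons i t => simp at hb
    subst hstack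
    refine ⟨fun a h => by simpa [pvBfs] using h, by simp, ?_, ?_⟩
    · intro hm _ a h; exact hm a (by simpa [pvBfs] using h)
    · intro hcl a ha j hj
      rw [show pvBfs g 0 [] s = s from rfl] at ha ⊢
      rcases hcl a ha j hj with h | h
      · exact h
      · simp at h
  | succ f ih =>
    intro stack s hl hr hb
    cases stack with
    | nil =>
      refine ⟨fun a h => by simpa [pvBfs] using h, by simp, ?_, ?_⟩
      · intro hm _ a h; exact hm a (by simpa [pvBfs] using h)
      · intro hcl a ha j hj
        rw [show pvBfs g (f+1) [] s = s from rfl] at ha ⊢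
        rcases hcl a ha j hj with h | h
        · exact h
        · simp at h
    | cons i rest =>
      have hi : PySem.Raise.InRange n' i := hr i (by simp)
      have hgeti : PySem.List.pyGetD s i false = s.getD (pvI n' i) false := by
        have := pvGetD s i false (hl ▸ hi); rwa [hl] at this
      rw [pvBfs]
      by_cases hc : PySem.List.pyGetD s i false = true
      · rw [if_pos hc]
        have hrec := ih rest s hl (fun x hx => hr x (by simp [hx])) (by simp at hb; omega)
        obtain ⟨m1, m2, m3, m4⟩ := hrec
        refine ⟨m1, ?_, ?_, ?_⟩
        · intro x hx
          rcases List.mem_cons.mp hx with he | hm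
          · subst he; exact m1 _ (hgeti ▸ hc)
          · exact m2 x hm
        · intro hm hst a h
          exact m3 hm (fun x hx => hst x (by simp [hx])) a h
        · intro hcl a ha j hj
          refine m4 ?_ a ha j hj
          intro a' ha' j' hj'
          rcases hcl a' ha' j' hj' with h | h
          · exact Or.inl h
          · rcases List.mem_cons.mp h with he | hm
            · subst he; exact Or.inl (hgeti ▸ hc)
            · exact Or.inr hm
      · have hcf : PySem.List.pyGetD s i false = false := eq_false_of_ne_true hc
        rw [hcf]
        rw [if_neg Bool.false_ne_true]
        have hplt : pvI n' i < n' := pvI_lt hi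
        have hset : PySem.List.pySetD s i true = s.set (pvI n' i) true := by
          have := pvSetD s i true (hl ▸ hi); rwa [hl] at this
        set s1 := PySem.List.pySetD s i true with hs1
        have hs1len : s1.length = n' := by rw [hset]; simp [hl]
        have hs1getD : ∀ a, s1.getD a false = (if a = pvI n' i then true else s.getD a false) := by
          intro a; rw [hset]; exact pv_getD_set s (pvI n' i) true false a (hl ▸ hplt)
        have hgets1 : ∀ j, PySem.Raise.InRange n' j →
            PySem.List.pyGetD s1 j false = s1.getD (pvI n' j) false := by
          intro j hj
          have := pvGetD s1 j false (hs1len ▸ hj); rwa [hs1len] at this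
        have hlst : PySem.List.pyGetD g i ([] : List Int) = g.getD (pvI n' i) [] := by
          have := pvGetD g i ([] : List Int) (hg ▸ hi); rwa [hg] at this
        set lst := PySem.List.pyGetD g i ([] : List Int) with hlstdef
        set stack1 := lst.foldl
          (fun st j => if PySem.List.pyGetD s1 j false then st else j :: st) rest with hstack1
        have hrest_r : ∀ x ∈ rest, PySem.Raise.InRange n' x := fun x hx => hr x (by simp [hx])
        have hstack1r : ∀ x ∈ stack1, PySem.Raise.InRange n' x := by
          intro x hx
          rcases pv_push_from s1 lst rest x hx with h | h
          · exact hrest_r x h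
          · exact (hnb (pvI n' i) x (hlst ▸ h)).1
        have hbound : stack1.length + pvPot g n' s1 ≤ f := by
          have h1 : stack1.length ≤ rest.length + lst.length := pv_push_len s1 lst rest
          have h2 : pvPot g n' s1 + (g.getD (pvI n' i) []).length = pvPot g n' s := by
            rw [hset]
            exact pvPot_set g n' s (pvI n' i) hplt (hl ▸ hplt) (hgeti ▸ hcf)
          have h3 : lst.length = (g.getD (pvI n' i) []).length := by rw [hlst]
          simp only [List.length_cons] at hb
          omega
        have hrec := ih stack1 s1 hs1len hstack1r hbound
        obtain ⟨m1, m2, m3, m4⟩ := hrec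
        have hmono : ∀ a, s.getD a false = true → (pvBfs g f stack1 s1).getD a false = true := by
          intro a h
          apply m1
          rw [hs1getD a]
          split
          · rfl
          · exact h
        refine ⟨hmono, ?_, ?_, ?_⟩
        · intro x hx
          rcases List.mem_cons.mp hx with he | hm
          · subst he
            apply m1
            rw [hs1getD (pvI n' x)]
            simp
          · exact m2 x (pv_push_subset s1 lst rest x hm)
        · intro hm hst a h
          refine m3 ?_ ?_ a h
          · intro a' ha'
            rw [hs1getD a'] at ha'
            by_cases hax : a' = pvI n' i
            · rw [hax]; exact hst i (by simp)
            · rw [if_neg hax] at ha'; exact hm a' ha'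
          · intro x hx
            rcases pv_push_from s1 lst rest x hx with h | h
            · exact hst x (by simp [h])
            · exact (hnb (pvI n' i) x (hlst ▸ h)).2 (hst i (by simp))
        · intro hcl a ha j hj
          refine m4 ?_ a ha j hj
          intro a' ha' j' hj'
          rw [hs1getD a'] at ha'
          by_cases hax : a' = pvI n' i
          · subst hax
            by_cases hjm : s1.getD (pvI n' j') false = true
            · exact Or.inl hjm
            · right
              apply pv_push_new s1 lst rest j' (hlst ▸ hj')
              rw [hgets1 j' (hnb _ j' hj').1]
              exact eq_false_of_ne_true hjm
          · rw [if_neg hax] at ha'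
            rcases hcl a' ha' j' hj' with h | h
            · left
              rw [hs1getD (pvI n' j')]
              split
              · rfl
              · exact h
            · rcases List.mem_cons.mp h with he | hm
              · subst he
                left
                rw [hs1getD (pvI n' j')]
                simp
              · right
                exact pv_push_subset s1 lst rest j' hm


-- ---------- phase 2 of A: the un-marking flood fill ----------

theorem pvDfs2A_len (f : List (List Int)) :
    (∀ fuel i vs, ((pvDfs2A f fuel i vs).1.length = vs.1.length ∧
                   (pvDfs2A f fuel i vs).2.length = vs.2.length)) ∧
    (∀ fuel js vs, ((pvDfs2AList f fuel js vs).1.length = vs.1.length ∧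
                    (pvDfs2AList f fuel js vs).2.length = vs.2.length)) := by
  refine pvDfs2A.mutual_induct f
    (fun fuel i vs => (pvDfs2A f fuel i vs).1.length = vs.1.length ∧
                      (pvDfs2A f fuel i vs).2.length = vs.2.length)
    (fun fuel js vs => (pvDfs2AList f fuel js vs).1.length = vs.1.length ∧
                       (pvDfs2AList f fuel js vs).2.length = vs.2.length) ?_ ?_ ?_ ?_
  · intro i vs; simp [pvDfs2A]
  · intro fuel i vs ih2
    rw [pvDfs2A]
    refine ⟨?_, ?_⟩
    · rw [ih2.1]; exact PySem.List.length_pySetD vs.1 i true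
    · exact ih2.2
  · intro fuel vs; simp [pvDfs2AList]
  · intro fuel j js vs ih1 ih2
    rw [pvDfs2AList]
    by_cases hc : PySem.List.pyGetD vs.1 j false = true
    · rw [if_pos hc]; rw [dif_pos hc] at ih2; exact ih2
    · have hc' := eq_false_of_ne_true hc
      rw [hc'] at ih2 ⊢
      rw [if_neg Bool.false_ne_true]
      rw [dif_neg Bool.false_ne_true] at ih2
      refine ⟨?_, ?_⟩
      · rw [ih2.1, ih1.1]
      · rw [ih2.2, ih1.2]; exact PySem.List.length_pySetD vs.2 j false

theorem pvDfs2A_mono (f : List (List Int)) :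
    (∀ fuel i vs a, (vs.1.getD a false = true → (pvDfs2A f fuel i vs).1.getD a false = true) ∧
        ((pvDfs2A f fuel i vs).2.getD a false = true → vs.2.getD a false = true)) ∧
    (∀ fuel js vs a, (vs.1.getD a false = true → (pvDfs2AList f fuel js vs).1.getD a false = true) ∧
        ((pvDfs2AList f fuel js vs).2.getD a false = true → vs.2.getD a false = true)) := by
  refine pvDfs2A.mutual_induct f
    (fun fuel i vs => ∀ a, (vs.1.getD a false = true → (pvDfs2A f fuel i vs).1.getD a false = true) ∧
        ((pvDfs2A f fuel i vs).2.getD a false = true → vs.2.getD a false = true))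
    (fun fuel js vs => ∀ a, (vs.1.getD a false = true → (pvDfs2AList f fuel js vs).1.getD a false = true) ∧
        ((pvDfs2AList f fuel js vs).2.getD a false = true → vs.2.getD a false = true)) ?_ ?_ ?_ ?_
  · intro i vs a; rw [pvDfs2A]; exact ⟨id, id⟩
  · intro fuel i vs ih2 a
    rw [pvDfs2A]
    exact ⟨fun h => (ih2 a).1 (pv_getD_pySetD_true vs.1 i a h), (ih2 a).2⟩
  · intro fuel vs a; rw [pvDfs2AList]; exact ⟨id, id⟩
  · intro fuel j js vs ih1 ih2 a
    rw [pvDfs2AList]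
    by_cases hc : PySem.List.pyGetD vs.1 j false = true
    · rw [if_pos hc]; rw [dif_pos hc] at ih2; exact ih2 a
    · have hc' := eq_false_of_ne_true hc
      rw [hc'] at ih2 ⊢
      rw [if_neg Bool.false_ne_true]
      rw [dif_neg Bool.false_ne_true] at ih2
      refine ⟨fun h => (ih2 a).1 ((ih1 a).1 h), fun h => ?_⟩
      have h2 := (ih2 a).2 h
      have h1 := (ih1 a).2 h2
      -- h1 : (vs.1, pySetD vs.2 j false).2.getD a false = true
      unfold PySem.List.pySetD PySem.List.pySet? at h1
      revert h1
      cases hx : PySem.List.pyIdx? vs.2.length j with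
      | none => intro h1; simpa using h1
      | some p =>
        intro h1
        simp only [Option.map_some, Option.getD_some] at h1
        rw [pv_getD_set _ _ _ _ _ (pvIdx_some_lt hx)] at h1
        by_cases hap : a = p
        · rw [if_pos hap] at h1; exact absurd h1 (by simp)
        · rwa [if_neg hap] at h1

theorem pvDfs2A_cnt (f : List (List Int)) :
    (∀ fuel i vs, pvCnt (pvDfs2A f fuel i vs).1 ≤ pvCnt vs.1) ∧
    (∀ fuel js vs, pvCnt (pvDfs2AList f fuel js vs).1 ≤ pvCnt vs.1) := by
  refine pvDfs2A.mutual_induct f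
    (fun fuel i vs => pvCnt (pvDfs2A f fuel i vs).1 ≤ pvCnt vs.1)
    (fun fuel js vs => pvCnt (pvDfs2AList f fuel js vs).1 ≤ pvCnt vs.1) ?_ ?_ ?_ ?_
  · intro i vs; rw [pvDfs2A]
  · intro fuel i vs ih2
    rw [pvDfs2A]
    exact le_trans ih2 (pvCnt_pySetD_le vs.1 i)
  · intro fuel vs; rw [pvDfs2AList]
  · intro fuel j js vs ih1 ih2
    rw [pvDfs2AList]
    by_cases hc : PySem.List.pyGetD vs.1 j false = true
    · rw [if_pos hc]; rw [dif_pos hc] at ih2; exact ih2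
    · have hc' := eq_false_of_ne_true hc
      rw [hc'] at ih2 ⊢
      rw [if_neg Bool.false_ne_true]
      rw [dif_neg Bool.false_ne_true] at ih2
      exact le_trans ih2 ih1

theorem pvDfs2A_inv (f : List (List Int)) (n' : Nat)
    (hf : f.length = n') (hnb : ∀ a j, j ∈ f.getD a [] → PySem.Raise.InRange n' j) :
    (∀ fuel i vs, vs.1.length = n' → vs.2.length = n' → PySem.Raise.InRange n' i →
      vs.2.getD (pvI n' i) false = false →
      (∀ a, vs.1.getD a false = true → vs.2.getD a false = false) →
      (∀ a, (pvDfs2A f fuel i vs).1.getD a false = true →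
            (pvDfs2A f fuel i vs).2.getD a false = false)) ∧
    (∀ fuel js vs, vs.1.length = n' → vs.2.length = n' → (∀ j ∈ js, PySem.Raise.InRange n' j) →
      (∀ a, vs.1.getD a false = true → vs.2.getD a false = false) →
      (∀ a, (pvDfs2AList f fuel js vs).1.getD a false = true →
            (pvDfs2AList f fuel js vs).2.getD a false = false)) := by
  refine pvDfs2A.mutual_induct f
    (fun fuel i vs => vs.1.length = n' → vs.2.length = n' → PySem.Raise.InRange n' i →
      vs.2.getD (pvI n' i) false = false →
      (∀ a, vs.1.getD a false = true → vs.2.getD a false = false) →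
      (∀ a, (pvDfs2A f fuel i vs).1.getD a false = true →
            (pvDfs2A f fuel i vs).2.getD a false = false))
    (fun fuel js vs => vs.1.length = n' → vs.2.length = n' → (∀ j ∈ js, PySem.Raise.InRange n' j) →
      (∀ a, vs.1.getD a false = true → vs.2.getD a false = false) →
      (∀ a, (pvDfs2AList f fuel js vs).1.getD a false = true →
            (pvDfs2AList f fuel js vs).2.getD a false = false)) ?_ ?_ ?_ ?_
  · intro i vs _ _ _ _ hinv a ha
    rw [pvDfs2A] at ha ⊢; exact hinv a ha
  · intro fuel i vs ih2 hl1 hl2 hi hsf hinv a ha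
    rw [pvDfs2A] at ha ⊢
    have hset : PySem.List.pySetD vs.1 i true = vs.1.set (pvI n' i) true := by
      have := pvSetD vs.1 i true (hl1 ▸ hi); rwa [hl1] at this
    have hjs : ∀ j ∈ PySem.List.pyGetD f i ([] : List Int), PySem.Raise.InRange n' j := by
      intro j hj
      have heq : PySem.List.pyGetD f i ([] : List Int) = f.getD (pvI n' i) [] := by
        have := pvGetD f i ([] : List Int) (hf ▸ hi); rwa [hf] at this
      exact hnb _ j (heq ▸ hj)
    refine ih2 ?_ hl2 hjs ?_ a ha
    · rw [hset]; simp [hl1]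
    · intro a' ha'
      rw [hset, pv_getD_set _ _ _ _ _ (by rw [hl1]; exact pvI_lt hi)] at ha'
      by_cases hax : a' = pvI n' i
      · rw [hax]; exact hsf
      · rw [if_neg hax] at ha'; exact hinv a' ha'
  · intro fuel vs _ _ _ hinv a ha
    rw [pvDfs2AList] at ha ⊢; exact hinv a ha
  · intro fuel j js vs ih1 ih2 hl1 hl2 hjs hinv a ha
    rw [pvDfs2AList] at ha ⊢
    by_cases hc : PySem.List.pyGetD vs.1 j false = true
    · rw [if_pos hc] at ha ⊢; rw [dif_pos hc] at ih2
      exact ih2 hl1 hl2 (fun j' hj' => hjs j' (by simp [hj'])) hinv a ha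
    · have hc' := eq_false_of_ne_true hc
      rw [hc'] at ih2 ha ⊢
      rw [if_neg Bool.false_ne_true] at ha ⊢
      rw [dif_neg Bool.false_ne_true] at ih2
      have hjr := hjs j (by simp)
      have hset2 : PySem.List.pySetD vs.2 j false = vs.2.set (pvI n' j) false := by
        have := pvSetD vs.2 j false (hl2 ▸ hjr); rwa [hl2] at this
      have hjlt : pvI n' j < n' := pvI_lt hjr
      have hinv' : ∀ a', vs.1.getD a' false = true →
          (PySem.List.pySetD vs.2 j false).getD a' false = false := by
        intro a' ha'
        rw [hset2, pv_getD_set _ _ _ _ _ (hl2 ▸ hjlt)]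
        by_cases hax : a' = pvI n' j
        · rw [if_pos hax]
        · rw [if_neg hax]; exact hinv a' ha'
      have hsf' : (PySem.List.pySetD vs.2 j false).getD (pvI n' j) false = false := by
        rw [hset2]; rw [pv_getD_set_self vs.2 (pvI n' j) false (hl2 ▸ hjlt)]
      have h1 := ih1 hl1 (by rw [PySem.List.length_pySetD]; exact hl2) hjr hsf' hinv'
      refine ih2 ?_ ?_ (fun j' hj' => hjs j' (by simp [hj'])) h1 a ha
      · exact (((pvDfs2A_len f).1 fuel j _).1).trans hl1
      · exact (((pvDfs2A_len f).1 fuel j _).2).trans (by rw [PySem.List.length_pySetD]; exact hl2)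


theorem pvDfs2A_complete (f : List (List Int)) (n' : Nat)
    (hf : f.length = n') (hnb : ∀ a j, j ∈ f.getD a [] → PySem.Raise.InRange n' j) :
    (∀ fuel i vs, vs.1.length = n' → vs.2.length = n' → PySem.Raise.InRange n' i →
      vs.1.getD (pvI n' i) false = false → pvCnt vs.1 ≤ fuel →
      (pvDfs2A f fuel i vs).1.getD (pvI n' i) false = true ∧
      (∀ a, (pvDfs2A f fuel i vs).1.getD a false = true →
        vs.1.getD a false = true ∨
        ∀ j ∈ f.getD a [], (pvDfs2A f fuel i vs).1.getD (pvI n' j) false = true) ∧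
      (∀ a, (pvDfs2A f fuel i vs).2.getD a false = false →
        vs.2.getD a false = false ∨ (pvDfs2A f fuel i vs).1.getD a false = true)) ∧
    (∀ fuel js vs, vs.1.length = n' → vs.2.length = n' → (∀ j ∈ js, PySem.Raise.InRange n' j) →
      pvCnt vs.1 ≤ fuel →
      (∀ j ∈ js, (pvDfs2AList f fuel js vs).1.getD (pvI n' j) false = true) ∧
      (∀ a, (pvDfs2AList f fuel js vs).1.getD a false = true →
        vs.1.getD a false = true ∨
        ∀ j ∈ f.getD a [], (pvDfs2AList f fuel js vs).1.getD (pvI n' j) false = true) ∧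
      (∀ a, (pvDfs2AList f fuel js vs).2.getD a false = false →
        vs.2.getD a false = false ∨ (pvDfs2AList f fuel js vs).1.getD a false = true)) := by
  refine pvDfs2A.mutual_induct f
    (fun fuel i vs => vs.1.length = n' → vs.2.length = n' → PySem.Raise.InRange n' i →
      vs.1.getD (pvI n' i) false = false → pvCnt vs.1 ≤ fuel →
      (pvDfs2A f fuel i vs).1.getD (pvI n' i) false = true ∧
      (∀ a, (pvDfs2A f fuel i vs).1.getD a false = true →
        vs.1.getD a false = true ∨
        ∀ j ∈ f.getD a [], (pvDfs2A f fuel i vs).1.getD (pvI n' j) false = true) ∧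
      (∀ a, (pvDfs2A f fuel i vs).2.getD a false = false →
        vs.2.getD a false = false ∨ (pvDfs2A f fuel i vs).1.getD a false = true))
    (fun fuel js vs => vs.1.length = n' → vs.2.length = n' → (∀ j ∈ js, PySem.Raise.InRange n' j) →
      pvCnt vs.1 ≤ fuel →
      (∀ j ∈ js, (pvDfs2AList f fuel js vs).1.getD (pvI n' j) false = true) ∧
      (∀ a, (pvDfs2AList f fuel js vs).1.getD a false = true →
        vs.1.getD a false = true ∨
        ∀ j ∈ f.getD a [], (pvDfs2AList f fuel js vs).1.getD (pvI n' j) false = true) ∧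
      (∀ a, (pvDfs2AList f fuel js vs).2.getD a false = false →
        vs.2.getD a false = false ∨ (pvDfs2AList f fuel js vs).1.getD a false = true)) ?_ ?_ ?_ ?_
  · intro i vs hl1 _ hi hfalse hcnt
    have := pvCnt_pos vs.1 (pvI n' i) (by rw [hl1]; exact pvI_lt hi) hfalse
    omega
  · intro fuel i vs ih2 hl1 hl2 hi hfalse hcnt
    rw [pvDfs2A]
    have hplt : pvI n' i < vs.1.length := by rw [hl1]; exact pvI_lt hi
    have hset : PySem.List.pySetD vs.1 i true = vs.1.set (pvI n' i) true := by
      have := pvSetD vs.1 i true (hl1 ▸ hi); rwa [hl1] at this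
    have heqjs : PySem.List.pyGetD f i ([] : List Int) = f.getD (pvI n' i) [] := by
      have := pvGetD f i ([] : List Int) (hf ▸ hi); rwa [hf] at this
    have hlen1 : (PySem.List.pySetD vs.1 i true).length = n' := by rw [hset]; simp [hl1]
    have hcnt1 : pvCnt (PySem.List.pySetD vs.1 i true) ≤ fuel := by
      rw [hset]
      have := pvCnt_set_true vs.1 (pvI n' i) hplt hfalse
      omega
    have hjsr : ∀ j ∈ PySem.List.pyGetD f i ([] : List Int), PySem.Raise.InRange n' j :=
      fun j hj => hnb _ j (heqjs ▸ hj)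
    obtain ⟨halljs, hclos, hcv⟩ := ih2 hlen1 hl2 hjsr hcnt1
    refine ⟨?_, ?_, ?_⟩
    · apply ((pvDfs2A_mono f).2 fuel _ _ (pvI n' i)).1
      rw [hset]
      exact pv_getD_set_self vs.1 (pvI n' i) true hplt
    · intro a ha
      rcases hclos a ha with hold | hnbs
      · rw [hset, pv_getD_set _ _ _ _ _ hplt] at hold
        by_cases hax : a = pvI n' i
        · right; rw [hax, ← heqjs]; exact halljs
        · left; rwa [if_neg hax] at hold
      · right; exact hnbs
    · exact hcv
  · intro fuel vs _ _ _ _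
    rw [pvDfs2AList]
    exact ⟨by simp, fun a ha => Or.inl ha, fun a ha => Or.inl ha⟩
  · intro fuel j js vs ih1 ih2 hl1 hl2 hjs hcnt
    rw [pvDfs2AList]
    by_cases hc : PySem.List.pyGetD vs.1 j false = true
    · rw [if_pos hc]; rw [dif_pos hc] at ih2
      obtain ⟨halljs, hclos, hcv⟩ := ih2 hl1 hl2 (fun j' hj' => hjs j' (by simp [hj'])) hcnt
      have hjr := hjs j (by simp)
      have hjt : vs.1.getD (pvI n' j) false = true := by
        have := pvGetD vs.1 j false (hl1 ▸ hjr); rw [hl1] at this; rwa [this] at hc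
      refine ⟨?_, hclos, hcv⟩
      intro j' hj'
      rcases List.mem_cons.mp hj' with he | hm
      · rw [he]; exact ((pvDfs2A_mono f).2 fuel js vs (pvI n' j)).1 hjt
      · exact halljs j' hm
    · have hc' := eq_false_of_ne_true hc
      rw [hc'] at ih2 ⊢
      rw [if_neg Bool.false_ne_true]
      rw [dif_neg Bool.false_ne_true] at ih2
      have hjr := hjs j (by simp)
      have hjlt : pvI n' j < n' := pvI_lt hjr
      have hjf : vs.1.getD (pvI n' j) false = false := by
        have := pvGetD vs.1 j false (hl1 ▸ hjr); rw [hl1] at this; rw [← this]; exact hc'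
      have hset2 : PySem.List.pySetD vs.2 j false = vs.2.set (pvI n' j) false := by
        have := pvSetD vs.2 j false (hl2 ▸ hjr); rwa [hl2] at this
      obtain ⟨hmark, hclos1, hcv1⟩ := ih1 hl1 (by rw [PySem.List.length_pySetD]; exact hl2) hjr hjf hcnt
      set vsub := pvDfs2A f fuel j (vs.1, PySem.List.pySetD vs.2 j false) with hvsub
      have hsl1 : vsub.1.length = n' := (((pvDfs2A_len f).1 fuel j _).1).trans hl1
      have hsl2 : vsub.2.length = n' :=
        (((pvDfs2A_len f).1 fuel j _).2).trans (by rw [PySem.List.length_pySetD]; exact hl2)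
      have hscnt : pvCnt vsub.1 ≤ fuel := le_trans ((pvDfs2A_cnt f).1 fuel j _) hcnt
      obtain ⟨halljs, hclos2, hcv2⟩ := ih2 hsl1 hsl2 (fun j' hj' => hjs j' (by simp [hj'])) hscnt
      refine ⟨?_, ?_, ?_⟩
      · intro j' hj'
        rcases List.mem_cons.mp hj' with he | hm
        · rw [he]; exact ((pvDfs2A_mono f).2 fuel js vsub (pvI n' j)).1 hmark
        · exact halljs j' hm
      · intro a ha
        rcases hclos2 a ha with h2 | hnbs
        · rcases hclos1 a h2 with h1 | hnbs1
          · exact Or.inl h1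
          · right
            intro j' hj'
            exact ((pvDfs2A_mono f).2 fuel js vsub (pvI n' j')).1 (hnbs1 j' hj')
        · right; exact hnbs
      · intro a ha
        rcases hcv2 a ha with h2 | hv
        · rcases hcv1 a h2 with h1 | hv1
          · rw [hset2, pv_getD_set _ _ _ _ _ (hl2 ▸ hjlt)] at h1
            by_cases hax : a = pvI n' j
            · right
              rw [hax]
              apply ((pvDfs2A_mono f).2 fuel js vsub (pvI n' j)).1
              exact hmark
            · left; rwa [if_neg hax] at h1
          · right; exact ((pvDfs2A_mono f).2 fuel js vsub a).1 hv1
        · right; exact hv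

theorem pvDfs2A_nocross (f : List (List Int)) (n' : Nat) (S : List Bool)
    (hf : f.length = n') (hnb : ∀ a j, j ∈ f.getD a [] → PySem.Raise.InRange n' j)
    (hSlen : S.length = n')
    (Hcl : ∀ a, S.getD a false = false → ∀ j ∈ f.getD a [], S.getD (pvI n' j) false = false) :
    (∀ fuel i vs, PySem.Raise.InRange n' i → S.getD (pvI n' i) false = false → vs.2 = S →
      (pvDfs2A f fuel i vs).2 = S) ∧
    (∀ fuel js vs, (∀ j ∈ js, PySem.Raise.InRange n' j ∧ S.getD (pvI n' j) false = false) →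
      vs.2 = S → (pvDfs2AList f fuel js vs).2 = S) := by
  refine pvDfs2A.mutual_induct f
    (fun fuel i vs => PySem.Raise.InRange n' i → S.getD (pvI n' i) false = false → vs.2 = S →
      (pvDfs2A f fuel i vs).2 = S)
    (fun fuel js vs => (∀ j ∈ js, PySem.Raise.InRange n' j ∧ S.getD (pvI n' j) false = false) →
      vs.2 = S → (pvDfs2AList f fuel js vs).2 = S) ?_ ?_ ?_ ?_
  · intro i vs _ _ hs; rw [pvDfs2A]; exact hs
  · intro fuel i vs ih2 hi hSf hs
    rw [pvDfs2A]
    refine ih2 ?_ hs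
    intro j hj
    have heqjs : PySem.List.pyGetD f i ([] : List Int) = f.getD (pvI n' i) [] := by
      have := pvGetD f i ([] : List Int) (hf ▸ hi); rwa [hf] at this
    rw [heqjs] at hj
    exact ⟨hnb _ j hj, Hcl (pvI n' i) hSf j hj⟩
  · intro fuel vs _ hs; rw [pvDfs2AList]; exact hs
  · intro fuel j js vs ih1 ih2 hjs hs
    rw [pvDfs2AList]
    by_cases hc : PySem.List.pyGetD vs.1 j false = true
    · rw [if_pos hc]; rw [dif_pos hc] at ih2
      exact ih2 (fun j' hj' => hjs j' (by simp [hj'])) hs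
    · have hc' := eq_false_of_ne_true hc
      rw [hc'] at ih2 ⊢
      rw [if_neg Bool.false_ne_true]
      rw [dif_neg Bool.false_ne_true] at ih2
      obtain ⟨hjr, hjSf⟩ := hjs j (by simp)
      have hsetid : PySem.List.pySetD vs.2 j false = S := by
        rw [hs]
        have := pvSetD S j false (hSlen ▸ hjr); rw [hSlen] at this; rw [this]
        exact pv_set_false_id S (pvI n' j) hjSf
      refine ih2 (fun j' hj' => hjs j' (by simp [hj'])) ?_
      exact ih1 hjr hjSf hsetid


-- ---------- the outer loop of A's phase 2 ----------

theorem pvI_natCast (n' : Nat) (i : Int) (h : 0 ≤ i) : pvI n' i = i.toNat := by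
  unfold pvI; rw [if_pos h]

def pvLoopStep (f : List (List Int)) (F : Nat) :
    (List Bool × List Bool) → Int → (List Bool × List Bool) :=
  fun vs i =>
    if !(PySem.List.pyGetD vs.2 i false) && !(PySem.List.pyGetD vs.1 i false)
    then pvDfs2A f F i vs else vs

theorem pvLoop_nocross (f : List (List Int)) (n' F : Nat) (S : List Bool)
    (hf : f.length = n') (hnb : ∀ a j, j ∈ f.getD a [] → PySem.Raise.InRange n' j)
    (hSlen : S.length = n')
    (Hcl : ∀ a, S.getD a false = false → ∀ j ∈ f.getD a [], S.getD (pvI n' j) false = false) :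
    ∀ (l : List Int) (vs : List Bool × List Bool),
      (∀ i ∈ l, PySem.Raise.InRange n' i) → vs.2 = S →
      (l.foldl (pvLoopStep f F) vs).2 = S := by
  intro l
  induction l with
  | nil => intro vs _ hs; exact hs
  | cons i t ih =>
    intro vs hr hs
    rw [List.foldl_cons]
    have hi : PySem.Raise.InRange n' i := hr i (by simp)
    refine ih _ (fun x hx => hr x (by simp [hx])) ?_
    unfold pvLoopStep
    by_cases hcnd : (!(PySem.List.pyGetD vs.2 i false) && !(PySem.List.pyGetD vs.1 i false)) = true
    · rw [if_pos hcnd]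
      have h2 : PySem.List.pyGetD vs.2 i false = false := by
        have h := hcnd; simp at h; exact h.1
      have hSf : S.getD (pvI n' i) false = false := by
        rw [hs] at h2
        have := pvGetD S i false (hSlen ▸ hi); rw [hSlen] at this; rw [← this]; exact h2
      exact (pvDfs2A_nocross f n' S hf hnb hSlen Hcl).1 F i vs hi hSf hs
    · rw [if_neg hcnd]; exact hs

theorem pvLoop_cross (f : List (List Int)) (n' F : Nat) (S : List Bool)
    (hf : f.length = n') (hnb : ∀ a j, j ∈ f.getD a [] → PySem.Raise.InRange n' j)
    (hFn : n' ≤ F) :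
    ∀ (l : List Int) (vs : List Bool × List Bool),
      (∀ i ∈ l, PySem.Raise.InRange n' i) →
      vs.1.length = n' → vs.2.length = n' →
      (∀ a, vs.1.getD a false = true → vs.2.getD a false = false) →
      (∀ a, vs.2.getD a false = true → S.getD a false = true) →
      (∀ a, vs.1.getD a false = true → ∀ j ∈ f.getD a [], vs.1.getD (pvI n' j) false = true) →
      (∀ a, a < n' → vs.2.getD a false = false → (vs.1.getD a false = true ∨ (a : Int) ∈ l)) →
      (l.foldl (pvLoopStep f F) vs).1.length = n' ∧
      (l.foldl (pvLoopStep f F) vs).2.length = n' ∧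
      (∀ a, (l.foldl (pvLoopStep f F) vs).1.getD a false = true →
            (l.foldl (pvLoopStep f F) vs).2.getD a false = false) ∧
      (∀ a, (l.foldl (pvLoopStep f F) vs).2.getD a false = true → S.getD a false = true) ∧
      (∀ a, (l.foldl (pvLoopStep f F) vs).1.getD a false = true →
            ∀ j ∈ f.getD a [], (l.foldl (pvLoopStep f F) vs).1.getD (pvI n' j) false = true) ∧
      (∀ a, a < n' → (l.foldl (pvLoopStep f F) vs).2.getD a false = false →
            (l.foldl (pvLoopStep f F) vs).1.getD a false = true) := by
  intro l
  induction l with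
  | nil =>
    intro vs _ hl1 hl2 hp1 hsub hclo hlast
    refine ⟨hl1, hl2, hp1, hsub, hclo, ?_⟩
    intro a ha hf2
    rcases hlast a ha hf2 with h | h
    · exact h
    · simp at h
  | cons i t ih =>
    intro vs hr hl1 hl2 hp1 hsub hclo hlast
    rw [List.foldl_cons]
    have hi : PySem.Raise.InRange n' i := hr i (by simp)
    by_cases hcnd : (!(PySem.List.pyGetD vs.2 i false) && !(PySem.List.pyGetD vs.1 i false)) = true
    · have hstep : pvLoopStep f F vs i = pvDfs2A f F i vs := by
        unfold pvLoopStep; rw [if_pos hcnd]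
      rw [hstep]
      obtain ⟨hv2', hv1'⟩ : PySem.List.pyGetD vs.2 i false = false ∧
          PySem.List.pyGetD vs.1 i false = false := by
        have h := hcnd; simp at h; exact h
      have hsusf : vs.2.getD (pvI n' i) false = false := by
        have := pvGetD vs.2 i false (hl2 ▸ hi); rw [hl2] at this; rw [← this]; exact hv2'
      have hvisf : vs.1.getD (pvI n' i) false = false := by
        have := pvGetD vs.1 i false (hl1 ▸ hi); rw [hl1] at this; rw [← this]; exact hv1'
      have hcnt : pvCnt vs.1 ≤ F := le_trans (le_trans (pvCnt_le vs.1) (le_of_eq hl1)) hFn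
      obtain ⟨hmark, hclos1, hcv1⟩ :=
        (pvDfs2A_complete f n' hf hnb).1 F i vs hl1 hl2 hi hvisf hcnt
      set vs' := pvDfs2A f F i vs with hvs'
      have hl1' : vs'.1.length = n' := (((pvDfs2A_len f).1 F i vs).1).trans hl1
      have hl2' : vs'.2.length = n' := (((pvDfs2A_len f).1 F i vs).2).trans hl2
      refine ih vs' (fun x hx => hr x (by simp [hx])) hl1' hl2' ?_ ?_ ?_ ?_
      · exact (pvDfs2A_inv f n' hf hnb).1 F i vs hl1 hl2 hi hsusf hp1
      · intro a ha
        exact hsub a (((pvDfs2A_mono f).1 F i vs a).2 ha)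
      · intro a ha
        rcases hclos1 a ha with hold | hnbs
        · intro j hj
          exact ((pvDfs2A_mono f).1 F i vs (pvI n' j)).1 (hclo a hold j hj)
        · exact hnbs
      · intro a haN ha
        rcases hcv1 a ha with hold | hv
        · rcases hlast a haN hold with h | h
          · exact Or.inl (((pvDfs2A_mono f).1 F i vs a).1 h)
          · rcases List.mem_cons.mp h with he | hm
            · left
              have : pvI n' i = a := by rw [← he, pvI_natCast n' _ (by omega)]; simp
              rw [← this]; exact hmark
            · exact Or.inr hm
        · exact Or.inl hv
    · have hstep : pvLoopStep f F vs i = vs := by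
        unfold pvLoopStep; rw [if_neg hcnd]
      rw [hstep]
      refine ih vs (fun x hx => hr x (by simp [hx])) hl1 hl2 hp1 hsub hclo ?_
      intro a haN ha
      rcases hlast a haN ha with h | h
      · exact Or.inl h
      · rcases List.mem_cons.mp h with he | hm
        · left
          have hai : pvI n' i = a := by rw [← he, pvI_natCast n' _ (by omega)]; simp
          have hor : vs.2.getD (pvI n' i) false = true ∨ vs.1.getD (pvI n' i) false = true := by
            by_contra hno
            rw [not_or] at hno
            obtain ⟨hn2, hn1⟩ := hno
            apply hcnd
            have e2 : PySem.List.pyGetD vs.2 i false = false := by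
              have := pvGetD vs.2 i false (hl2 ▸ hi); rw [hl2] at this; rw [this]
              exact Bool.eq_false_iff.mpr hn2
            have e1 : PySem.List.pyGetD vs.1 i false = false := by
              have := pvGetD vs.1 i false (hl1 ▸ hi); rw [hl1] at this; rw [this]
              exact Bool.eq_false_iff.mpr hn1
            rw [e1, e2]
            rfl
          rcases hor with h2 | h1
          · rw [hai] at h2; rw [h2] at ha; exact absurd ha (by simp)
          · rw [hai] at h1; exact h1
        · exact Or.inr hm

-- total size of the built adjacency (for the stack loop's fuel)
theorem pvBuildG_sum (n' : Nat) :
    ∀ (l : List (List Int)) (acc : List (List Int)),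
      (∀ inv ∈ l, inv.length = 2 ∧ ∀ x ∈ inv, PySem.Raise.InRange n' x) →
      acc.length = n' →
      (∑ a ∈ Finset.range n', ((l.foldl pvBuildG acc).getD a []).length) ≤
      (∑ a ∈ Finset.range n', (acc.getD a []).length) + l.length := by
  intro l
  induction l with
  | nil => intro acc _ _; simp
  | cons inv t ih =>
    intro acc hwf hl
    obtain ⟨hlen2, hr⟩ := hwf inv (by simp)
    rcases inv with _ | ⟨x, _ | ⟨y, _ | _⟩⟩ <;> simp at hlen2
    have hx : PySem.Raise.InRange n' x := hr x (by simp)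
    have hplt : pvI n' x < n' := pvI_lt hx
    have hstep : List.foldl pvBuildG acc ([x, y] :: t) =
        List.foldl pvBuildG (PySem.List.pySetD acc x (PySem.List.pyGetD acc x [] ++ [y])) t := rfl
    rw [hstep]
    have hacc' : PySem.List.pySetD acc x (PySem.List.pyGetD acc x [] ++ [y]) =
        acc.set (pvI n' x) (acc.getD (pvI n' x) [] ++ [y]) := by
      rw [pvSetD _ _ _ (hl ▸ hx), pvGetD _ _ _ (hl ▸ hx), hl]
    have hsum : (∑ a ∈ Finset.range n',
        ((PySem.List.pySetD acc x (PySem.List.pyGetD acc x [] ++ [y])).getD a []).length) =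
        (∑ a ∈ Finset.range n', (acc.getD a []).length) + 1 := by
      rw [hacc']
      rw [← Finset.sum_erase_add _ _ (Finset.mem_range.mpr hplt),
          ← Finset.sum_erase_add _ _ (Finset.mem_range.mpr hplt)]
      have h1 : ∀ a ∈ (Finset.range n').erase (pvI n' x),
          ((acc.set (pvI n' x) (acc.getD (pvI n' x) [] ++ [y])).getD a []).length =
          ((acc.getD a []).length) := by
        intro a ha
        rw [pv_getD_set _ _ _ _ _ (hl ▸ hplt), if_neg (Finset.ne_of_mem_erase ha)]
      rw [Finset.sum_congr rfl h1]
      have h2 : (acc.set (pvI n' x) (acc.getD (pvI n' x) [] ++ [y])).getD (pvI n' x) [] =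
          acc.getD (pvI n' x) [] ++ [y] := by
        rw [pv_getD_set _ _ _ _ _ (hl ▸ hplt), if_pos rfl]
      rw [h2]
      simp [Nat.add_assoc]
    have := ih (PySem.List.pySetD acc x (PySem.List.pyGetD acc x [] ++ [y]))
      (fun i hi => hwf i (by simp [hi]))
      (by rw [hacc']; simp [hl])
    rw [hsum] at this
    simp only [List.length_cons]
    omega


theorem pvBfs_len (g : List (List Int)) :
    ∀ fuel stack s, (pvBfs g fuel stack s).length = s.length := by
  intro fuel
  induction fuel with
  | zero => intro stack s; rfl
  | succ f ih =>
    intro stack s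
    cases stack with
    | nil => rfl
    | cons i rest =>
      rw [pvBfs]
      by_cases hc : PySem.List.pyGetD s i false = true
      · rw [if_pos hc]; exact ih rest s
      · rw [eq_false_of_ne_true hc, if_neg Bool.false_ne_true]
        rw [ih _ _, PySem.List.length_pySetD]

-- ---------- the main equivalence ----------

theorem pv_main (n k : Int) (invocations : List (List Int))
    (hpre : Pre_remainingMethods n k invocations) :
    remainingMethods n k invocations = remainingMethods_alt n k invocations := by
  obtain ⟨hn1, hkr, hinv⟩ := hpre
  have hnn : ((n.toNat : Int)) = n := Int.toNat_of_nonneg (by omega)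
  simp only [remainingMethods, remainingMethods_alt]
  set n' := n.toNat with hn'
  set g0 : List (List Int) := (PySem.List.pyRange 0 n 1).map (fun _ => ([] : List Int)) with hg0
  have hg0len : g0.length = n' := by
    rw [hg0, List.length_map, PySem.List.length_pyRange_one]; simp [hn']
  have hg0getD : ∀ a, g0.getD a [] = [] := fun a => pv_map_const_getD _ _ a
  have hwf : ∀ inv ∈ invocations, inv.length = 2 ∧ ∀ x ∈ inv, PySem.Raise.InRange n' x := hinv
  -- the common directed adjacency
  set G := invocations.foldl pvBuildG g0 with hG
  obtain ⟨hGlen, hGmem0⟩ := pvBuildG_spec n' invocations g0 hwf hg0len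
  have hGmem : ∀ a j, (j ∈ G.getD a [] ↔
      ∃ x y, [x, y] ∈ invocations ∧ pvI n' x = a ∧ y = j) := by
    intro a j
    have := hGmem0 a j
    rw [hg0getD a] at this
    simpa using this
  have hfg2 : (invocations.foldl pvBuildFG (g0, g0)).2 = G := pvFG_snd invocations (g0, g0)
  -- reachability
  have hnbG : ∀ a j, j ∈ G.getD a [] →
      PySem.Raise.InRange n' j ∧
      (Relation.ReflTransGen (pvE invocations n') (pvI n' k) a →
       Relation.ReflTransGen (pvE invocations n') (pvI n' k) (pvI n' j)) := by
    intro a j hj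
    obtain ⟨x, y, hm, hxa, hyj⟩ := (hGmem a j).mp hj
    constructor
    · subst hyj; exact (hwf _ hm).2 y (by simp)
    · intro hra
      exact Relation.ReflTransGen.tail hra ⟨x, y, hm, hxa, by rw [hyj]⟩
  set s0 := PySem.List.pyRepeat [false] n with hs0def
  have hs0 : s0 = List.replicate n' false := pv_repeat_false n
  have hs0len : s0.length = n' := by rw [hs0]; simp
  have hs0getD : ∀ a, s0.getD a false = false := by intro a; rw [hs0]; exact pv_replicate_getD n' a
  set SA := pvDfsA G n' k s0 with hSA
  have hSAlen : SA.length = n' := by rw [hSA, (pvDfsA_len G).1]; exact hs0len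
  obtain ⟨hSAK, hSAclos⟩ := (pvDfsA_complete G n' hGlen (fun a j hj => (hnbG a j hj).1)).1
    n' k s0 hs0len hkr (by rw [hs0]; exact pv_replicate_getD n' _) (by rw [hs0, pvCnt_replicate])
  have hSAiff : ∀ a, (SA.getD a false = true ↔
      Relation.ReflTransGen (pvE invocations n') (pvI n' k) a) := by
    intro a
    constructor
    · intro h
      refine (pvDfsA_sound G n'
        (fun a => Relation.ReflTransGen (pvE invocations n') (pvI n' k) a) hGlen hnbG).1
        n' k s0 hs0len hkr Relation.ReflTransGen.refl ?_ a h
      intro a' ha'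
      rw [hs0getD a'] at ha'
      exact absurd ha' (by simp)
    · intro h
      induction h with
      | refl => exact hSAK
      | tail hp e ihh =>
        obtain ⟨x, y, hm, hxa, hyb⟩ := e
        have hyG : y ∈ G.getD _ [] := (hGmem _ y).mpr ⟨x, y, hm, hxa, rfl⟩
        rcases hSAclos _ ihh with h0 | hcl
        · rw [hs0getD] at h0; exact absurd h0 (by simp)
        · have := hcl y hyG; rwa [hyb] at this
  set SB := pvBfs G (invocations.length + 1) [k] s0 with hSB
  have hSBlen : SB.length = n' := by rw [hSB, pvBfs_len]; exact hs0len
  have hpot : pvPot G n' s0 ≤ invocations.length := by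
    have h1 : pvPot G n' s0 = ∑ a ∈ Finset.range n', (G.getD a []).length := by
      unfold pvPot
      refine Finset.sum_congr rfl ?_
      intro a _
      rw [hs0getD a, if_pos rfl]
    have h2 := pvBuildG_sum n' invocations g0 hwf hg0len
    have h3 : (∑ a ∈ Finset.range n', (g0.getD a []).length) = 0 := by
      refine Finset.sum_eq_zero ?_
      intro a _
      rw [hg0getD a]
      rfl
    rw [h1, hG]
    omega
  obtain ⟨m1, m2, m3, m4⟩ := pvBfs_main G n'
    (fun a => Relation.ReflTransGen (pvE invocations n') (pvI n' k) a) hGlen hnbG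
    (invocations.length + 1) [k] s0 hs0len
    (by intro x hx; simp at hx; subst hx; exact hkr)
    (by simp only [List.length_cons, List.length_nil]; omega)
  have hSBclos : ∀ a, SB.getD a false = true →
      ∀ j ∈ G.getD a [], SB.getD (pvI n' j) false = true := by
    refine m4 ?_
    intro a ha
    rw [hs0getD a] at ha
    exact absurd ha (by simp)
  have hSBK : SB.getD (pvI n' k) false = true := m2 k (by simp)
  have hSBiff : ∀ a, (SB.getD a false = true ↔
      Relation.ReflTransGen (pvE invocations n') (pvI n' k) a) := by
    intro a
    constructor
    · intro h
      refine m3 ?_ ?_ a h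
      · intro a' ha'
        rw [hs0getD a'] at ha'
        exact absurd ha' (by simp)
      · intro x hx
        simp at hx
        subst hx
        exact Relation.ReflTransGen.refl
    · intro h
      induction h with
      | refl => exact hSBK
      | tail hp e ihh =>
        obtain ⟨x, y, hm, hxa, hyb⟩ := e
        have hyG : y ∈ G.getD _ [] := (hGmem _ y).mpr ⟨x, y, hm, hxa, rfl⟩
        have := hSBclos _ ihh y hyG
        rwa [hyb] at this
  have hAB : SA = SB := by
    refine pv_list_eq_of_getD SA SB (by rw [hSAlen, hSBlen]) ?_
    intro a
    by_cases hra : Relation.ReflTransGen (pvE invocations n') (pvI n' k) a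
    · rw [(hSAiff a).mpr hra, (hSBiff a).mpr hra]
    · have e1 : SA.getD a false = false :=
        Bool.eq_false_iff.mpr (fun h => hra ((hSAiff a).mp h))
      have e2 : SB.getD a false = false :=
        Bool.eq_false_iff.mpr (fun h => hra ((hSBiff a).mp h))
      rw [e1, e2]
  -- the undirected adjacency of A
  set f := (invocations.foldl pvBuildFG (g0, g0)).1 with hfdef
  obtain ⟨hFlen, hFmem0⟩ := pvBuildFG_fst_spec n' invocations (g0, g0) hwf hg0len
  have hFmem : ∀ a j, (j ∈ f.getD a [] ↔
      ∃ x y, [x, y] ∈ invocations ∧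
        ((pvI n' x = a ∧ y = j) ∨ (pvI n' y = a ∧ x = j))) := by
    intro a j
    have := hFmem0 a j
    rw [show (g0, g0).1.getD a ([] : List Int) = [] from hg0getD a] at this
    simpa using this
  have hnbF : ∀ a j, j ∈ f.getD a [] → PySem.Raise.InRange n' j := by
    intro a j hj
    obtain ⟨x, y, hm, h12⟩ := (hFmem a j).mp hj
    rcases h12 with ⟨_, hy⟩ | ⟨_, hx⟩
    · subst hy; exact (hwf _ hm).2 y (by simp)
    · subst hx; exact (hwf _ hm).2 x (by simp)
  -- the crossing condition and B's scan
  have hrange_r : ∀ i ∈ PySem.List.pyRange 0 n 1, PySem.Raise.InRange n' i := by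
    intro i hi
    rw [PySem.List.mem_pyRange_one] at hi
    constructor <;> omega
  have hany : ((invocations.any fun inv =>
      match inv with
      | [a, b] => PySem.List.pyGetD SB a false != PySem.List.pyGetD SB b false
      | _ => false) = true) ↔
      (∃ x y, [x, y] ∈ invocations ∧
        SA.getD (pvI n' x) false ≠ SA.getD (pvI n' y) false) := by
    rw [List.any_eq_true]
    constructor
    · rintro ⟨inv, hm, hp⟩
      obtain ⟨hlen2, hr⟩ := hwf inv hm
      rcases inv with _ | ⟨x, _ | ⟨y, _ | _⟩⟩ <;> simp at hlen2
      refine ⟨x, y, hm, ?_⟩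
      have ex : PySem.List.pyGetD SB x false = SB.getD (pvI n' x) false := by
        have := pvGetD SB x false (hSBlen ▸ hr x (by simp)); rwa [hSBlen] at this
      have ey : PySem.List.pyGetD SB y false = SB.getD (pvI n' y) false := by
        have := pvGetD SB y false (hSBlen ▸ hr y (by simp)); rwa [hSBlen] at this
      have hp' : (PySem.List.pyGetD SB x false != PySem.List.pyGetD SB y false) = true := hp
      rw [ex, ey, bne_iff_ne] at hp'
      rw [hAB]
      exact hp'
    · rintro ⟨x, y, hm, hne⟩
      obtain ⟨hlen2, hr⟩ := hwf [x, y] hm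
      refine ⟨[x, y], hm, ?_⟩
      show (PySem.List.pyGetD SB x false != PySem.List.pyGetD SB y false) = true
      have ex : PySem.List.pyGetD SB x false = SB.getD (pvI n' x) false := by
        have := pvGetD SB x false (hSBlen ▸ hr x (by simp)); rwa [hSBlen] at this
      have ey : PySem.List.pyGetD SB y false = SB.getD (pvI n' y) false := by
        have := pvGetD SB y false (hSBlen ▸ hr y (by simp)); rwa [hSBlen] at this
      rw [ex, ey, bne_iff_ne]
      rw [hAB] at hne
      exact hne
  rw [hfg2]
  rw [show (fun (vs : List Bool × List Bool) (i : Int) =>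
      if !(PySem.List.pyGetD vs.2 i false) && !(PySem.List.pyGetD vs.1 i false)
      then pvDfs2A f n' i vs else vs) = pvLoopStep f n' from rfl]
  by_cases hcr : ∃ x y, [x, y] ∈ invocations ∧
      SA.getD (pvI n' x) false ≠ SA.getD (pvI n' y) false
  · -- crossing edge: everything survives
    rw [if_pos (hany.mpr hcr)]
    obtain ⟨hstl1, hstl2, hP1, hsubS, hclos, hlastv⟩ :=
      pvLoop_cross f n' n' SA hFlen hnbF (le_refl n') (PySem.List.pyRange 0 n 1) (s0, SA)
        hrange_r hs0len hSAlen
        (by intro a ha; rw [hs0getD a] at ha; exact absurd ha (by simp))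
        (by intro a ha; exact ha)
        (by intro a ha; rw [hs0getD a] at ha; exact absurd ha (by simp))
        (by
          intro a haN _
          right
          rw [PySem.List.mem_pyRange_one]
          constructor
          · omega
          · omega)
    set st := (PySem.List.pyRange 0 n 1).foldl (pvLoopStep f n') (s0, SA) with hst
    have hedge : ∀ x y, [x, y] ∈ invocations →
        (st.1.getD (pvI n' x) false = true ↔ st.1.getD (pvI n' y) false = true) := by
      intro x y hm
      constructor
      · intro h
        exact hclos _ h y ((hFmem (pvI n' x) y).mpr ⟨x, y, hm, Or.inl ⟨rfl, rfl⟩⟩)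
      · intro h
        exact hclos _ h x ((hFmem (pvI n' y) x).mpr ⟨x, y, hm, Or.inr ⟨rfl, rfl⟩⟩)
    have hT1 : ∀ a, Relation.ReflTransGen (pvE invocations n') (pvI n' k) a →
        st.1.getD (pvI n' k) false = true → st.1.getD a false = true := by
      intro a h
      induction h with
      | refl => exact id
      | tail hp e ihh =>
        intro hK
        obtain ⟨x, y, hm, hxa, hyb⟩ := e
        rw [← hyb]
        exact (hedge x y hm).mp (hxa ▸ ihh hK)
    have hT2 : ∀ a, Relation.ReflTransGen (pvE invocations n') (pvI n' k) a →
        st.1.getD a false = true → st.1.getD (pvI n' k) false = true := by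
      intro a h
      induction h with
      | refl => exact id
      | tail hp e ihh =>
        intro hc
        obtain ⟨x, y, hm, hxa, hyb⟩ := e
        refine ihh ?_
        rw [← hxa]
        exact (hedge x y hm).mpr (hyb ▸ hc)
    obtain ⟨x, y, hm, hne⟩ := hcr
    have hclE : SA.getD (pvI n' x) false = true → SA.getD (pvI n' y) false = true := by
      intro h
      exact (hSAiff _).mpr (Relation.ReflTransGen.tail ((hSAiff _).mp h) ⟨x, y, hm, rfl, rfl⟩)
    have hex : SA.getD (pvI n' x) false = false := by
      cases hb : SA.getD (pvI n' x) false with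
      | false => rfl
      | true => exact absurd (hb.trans (hclE hb).symm) hne
    have hey : SA.getD (pvI n' y) false = true := by
      cases hb : SA.getD (pvI n' y) false with
      | false => rw [hex, hb] at hne; exact absurd rfl hne
      | true => rfl
    have hxv : st.1.getD (pvI n' x) false = true := by
      refine hlastv (pvI n' x) (pvI_lt ((hwf _ hm).2 x (by simp))) ?_
      cases hb : st.2.getD (pvI n' x) false with
      | false => rfl
      | true =>
        have h' := hsubS _ hb
        rw [h'] at hex
        exact absurd hex (by simp)
    have hyv : st.1.getD (pvI n' y) false = true := (hedge x y hm).mp hxv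
    have hKv : st.1.getD (pvI n' k) false = true := hT2 _ ((hSAiff _).mp hey) hyv
    have hall : ∀ a, a < n' → st.2.getD a false = false := by
      intro a haN
      cases hb : st.2.getD a false with
      | false => rfl
      | true =>
        have hSAa := hsubS a hb
        have hV := hT1 a ((hSAiff a).mp hSAa) hKv
        rw [hP1 a hV] at hb
        exact absurd hb (by simp)
    refine List.filter_eq_self.mpr ?_
    intro i hi
    have hir := hrange_r i hi
    have : PySem.List.pyGetD st.2 i false = st.2.getD (pvI n' i) false := by
      have := pvGetD st.2 i false (hstl2 ▸ hir); rwa [hstl2] at this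
    rw [this, hall (pvI n' i) (pvI_lt hir)]
    rfl
  · -- no crossing edge: phase 2 never un-marks anything
    rw [if_neg (fun h => hcr (hany.mp h))]
    have Hcl : ∀ a, SA.getD a false = false →
        ∀ j ∈ f.getD a [], SA.getD (pvI n' j) false = false := by
      intro a ha j hj
      obtain ⟨x, y, hm, h12⟩ := (hFmem a j).mp hj
      have heq : SA.getD (pvI n' x) false = SA.getD (pvI n' y) false := by
        by_contra hne
        exact hcr ⟨x, y, hm, hne⟩
      rcases h12 with ⟨hxa, hy⟩ | ⟨hya, hx⟩
      · subst hy; rw [← heq, hxa]; exact ha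
      · subst hx; rw [heq, hya]; exact ha
    have hst2 : ((PySem.List.pyRange 0 n 1).foldl (pvLoopStep f n') (s0, SA)).2 = SA :=
      pvLoop_nocross f n' n' SA hFlen hnbF hSAlen Hcl (PySem.List.pyRange 0 n 1) (s0, SA)
        hrange_r rfl
    rw [hst2, hAB]

-- ===== VERDICT (by name: the statement is the Claim_ definition above) =====
theorem remainingMethods_spec : Claim_equal_remainingMethods := by
  intro n k invocations _ hpre
  unfold Spec_remainingMethods
  exact pv_main n k invocations hpre
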